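-- pv_equiv track=rewrite | github.com/CodingSage/celebration-bot | celebration.py | _extract_nouns_verbs
-- ===== SOURCE A (Python) =====
-- def _extract_nouns_verbs(tagged):
--     nouns = []
--     verbs = []
--     actionnouns = []
--     verbs_encountered = False
--     for tag in tagged:
--         if tag[1][0] == 'N' and not verbs_encountered:
--             nouns.append(tag[0])
--         elif tag[1][0] == 'N' and verbs_encountered:
--             actionnouns.append(tag[0])
--         elif tag[1][0] == 'V':
--             verbs.append(tag[0])
--             verbs_encountered = True
--
--     return (nouns, verbs, actionnouns)
-- ===== SOURCE B (Python) =====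
-- def _extract_nouns_verbs(tagged):
--     idx = len(tagged)
--     for i, t in enumerate(tagged):
--         if t[1][0] == 'V':
--             idx = i
--             break
--     nouns = [t[0] for t in tagged[:idx] if t[1][0] == 'N']
--     actionnouns = [t[0] for t in tagged[idx:] if t[1][0] == 'N']
--     verbs = [t[0] for t in tagged if t[1][0] == 'V']
--     return (nouns, verbs, actionnouns)
-- ===== Notes on version B (the rewrite author's own statement) =====
-- stated objective: alternative
-- what changed: Replaces the single stateful flag-driven pass with a find-first-verb-pivot plus three independent filter passes (nouns before the pivot, action-nouns from the pivot on, verbs everywhere).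
-- outside the precondition, e.g. on _extract_nouns_verbs([('x', '')]): A raises IndexError, B raises IndexError
import Mathlib
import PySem

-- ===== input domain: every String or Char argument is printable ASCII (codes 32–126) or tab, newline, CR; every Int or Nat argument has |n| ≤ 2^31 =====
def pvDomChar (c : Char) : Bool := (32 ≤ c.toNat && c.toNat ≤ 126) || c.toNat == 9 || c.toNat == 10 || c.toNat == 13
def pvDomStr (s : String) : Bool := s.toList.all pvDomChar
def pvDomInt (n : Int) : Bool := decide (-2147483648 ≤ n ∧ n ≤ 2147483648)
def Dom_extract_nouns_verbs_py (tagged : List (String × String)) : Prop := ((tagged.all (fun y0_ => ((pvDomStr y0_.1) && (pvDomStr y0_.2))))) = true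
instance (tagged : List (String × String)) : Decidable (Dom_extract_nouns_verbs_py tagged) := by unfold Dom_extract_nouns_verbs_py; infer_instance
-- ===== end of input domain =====

-- B replaces A's single stateful flag-driven pass with a find-first-verb-pivot
-- plus three independent filter passes (alternative decomposition, same cost).


-- ===== PORT A =====
-- tag[1][0] is ported as PySem.Str.pyGet? tag.2 0 (none = IndexError; Pre_ excludes those inputs).
def pvAGo (tagged : List (String × String)) (verbs_encountered : Bool) :
    List String × List String × List String :=
  match tagged with
  | [] => ([], [], [])
  | tag :: rest =>
    if PySem.Str.pyGet? tag.2 0 = some 'N' ∧ verbs_encountered = false then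
      let r := pvAGo rest verbs_encountered
      (tag.1 :: r.1, r.2.1, r.2.2)
    else if PySem.Str.pyGet? tag.2 0 = some 'N' ∧ verbs_encountered = true then
      let r := pvAGo rest verbs_encountered
      (r.1, r.2.1, tag.1 :: r.2.2)
    else if PySem.Str.pyGet? tag.2 0 = some 'V' then
      let r := pvAGo rest true
      (r.1, tag.1 :: r.2.1, r.2.2)
    else
      pvAGo rest verbs_encountered

def extract_nouns_verbs_py (tagged : List (String × String)) : List String × List String × List String :=
  pvAGo tagged false

-- ===== PORT B =====
-- index of the first verb token (len tagged if none)
def pvFirstVerb (tagged : List (String × String)) : Nat :=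
  match tagged with
  | [] => 0
  | t :: rest => if PySem.Str.pyGet? t.2 0 = some 'V' then 0 else pvFirstVerb rest + 1

def pvNounsOf (l : List (String × String)) : List String :=
  (l.filter (fun t => PySem.Str.pyGet? t.2 0 = some 'N')).map Prod.fst

def pvVerbsOf (l : List (String × String)) : List String :=
  (l.filter (fun t => PySem.Str.pyGet? t.2 0 = some 'V')).map Prod.fst

def extract_nouns_verbs_py_alt (tagged : List (String × String)) : List String × List String × List String :=
  let idx := pvFirstVerb tagged
  (pvNounsOf (tagged.take idx), pvVerbsOf tagged, pvNounsOf (tagged.drop idx))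

-- ===== PRECONDITION & SPEC =====
-- Pre_ excludes inputs containing a token with an empty tag string, on which the Python A
-- (and B) raises IndexError at tag[1][0].
def Pre_extract_nouns_verbs_py (tagged : List (String × String)) : Prop :=
  ∀ p ∈ tagged, p.2 ≠ ""
instance (tagged : List (String × String)) : Decidable (Pre_extract_nouns_verbs_py tagged) := by
  unfold Pre_extract_nouns_verbs_py; infer_instance

def pvWitness_extract_nouns_verbs_py : (List (String × String)) :=
  [("dog", "NN"), ("runs", "VBZ"), ("home", "NN")]

def Spec_extract_nouns_verbs_py (tagged : List (String × String)) (out : List String × List String × List String) : Prop := out = extract_nouns_verbs_py_alt tagged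
instance (tagged : List (String × String)) (out : List String × List String × List String) : Decidable (Spec_extract_nouns_verbs_py tagged out) := by unfold Spec_extract_nouns_verbs_py; infer_instance

-- ===== CLAIM (what is proved, stated in full; the proofs are below) =====
def Claim_equal_extract_nouns_verbs_py : Prop := ∀ (tagged : List (String × String)), Dom_extract_nouns_verbs_py tagged → Pre_extract_nouns_verbs_py tagged → Spec_extract_nouns_verbs_py tagged (extract_nouns_verbs_py tagged)

-- ===== LEMMAS AND PROOFS =====

-- once the flag is set, A collects all verbs and all remaining nouns (as action-nouns)
theorem pvAGo_true (l : List (String × String)) :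
    pvAGo l true = ([], pvVerbsOf l, pvNounsOf l) := by
  induction l with
  | nil => rfl
  | cons t rest ih =>
    by_cases hN : PySem.List.pyGet? t.2.toList 0 = some 'N'
    · have hV : ¬ PySem.List.pyGet? t.2.toList 0 = some 'V' := by simp [hN]
      simp [pvAGo, pvNounsOf, pvVerbsOf, PySem.Str.pyGet?, hN, ih]
    · by_cases hV : PySem.List.pyGet? t.2.toList 0 = some 'V'
      · simp [pvAGo, pvNounsOf, pvVerbsOf, PySem.Str.pyGet?, hV, ih]
      · simp [pvAGo, pvNounsOf, pvVerbsOf, PySem.Str.pyGet?, hN, hV, ih]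

theorem pvAGo_false (l : List (String × String)) :
    pvAGo l false =
      (pvNounsOf (l.take (pvFirstVerb l)), pvVerbsOf l, pvNounsOf (l.drop (pvFirstVerb l))) := by
  induction l with
  | nil => rfl
  | cons t rest ih =>
    by_cases hV : PySem.List.pyGet? t.2.toList 0 = some 'V'
    · have hN : ¬ PySem.List.pyGet? t.2.toList 0 = some 'N' := by simp [hV]
      simp [pvAGo, pvFirstVerb, pvNounsOf, pvVerbsOf, PySem.Str.pyGet?, hV, pvAGo_true]
    · by_cases hN : PySem.List.pyGet? t.2.toList 0 = some 'N'
      · simp [pvAGo, pvFirstVerb, pvNounsOf, pvVerbsOf, PySem.Str.pyGet?, hN, ih]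
      · simp [pvAGo, pvFirstVerb, pvNounsOf, pvVerbsOf, PySem.Str.pyGet?, hN, hV, ih]

-- ===== VERDICT (by name: the statement is the Claim_ definition above) =====
theorem extract_nouns_verbs_py_spec : Claim_equal_extract_nouns_verbs_py := by
  intro tagged _ _
  unfold Spec_extract_nouns_verbs_py extract_nouns_verbs_py extract_nouns_verbs_py_alt
  exact pvAGo_false tagged
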